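-- pv_equiv track=rewrite | github.com/liuxiaotong/knowlyr-crew | src/crew/memory_cache.py | _truncate_to_token_limit
-- ===== SOURCE A (Python) =====
-- _PROMPT_TOKEN_LIMIT = 800
--
-- def _truncate_to_token_limit(text: str, limit: int = _PROMPT_TOKEN_LIMIT) -> str:
--     """粗略按字符数截断（中文 1 字 ~= 1.5 token，英文 1 word ~= 1 token）.
--
--     保守估算：每 2 字符约 1 token。
--     """
--     char_limit = limit * 2  # 粗略映射
--     if len(text) <= char_limit:
--         return text
--     # 按行截断，保留完整行
--     lines = text.split("\n")
--     result_lines: list[str] = []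
--     total = 0
--     for line in lines:
--         if total + len(line) > char_limit:
--             break
--         result_lines.append(line)
--         total += len(line) + 1  # +1 for newline
--     return "\n".join(result_lines)
-- ===== SOURCE B (Python) =====
-- _PROMPT_TOKEN_LIMIT = 800
--
-- def _truncate_to_token_limit(text: str, limit: int = _PROMPT_TOKEN_LIMIT) -> str:
--     """Prefix-sum table + binary search instead of accumulate-and-break."""
--     char_limit = limit * 2
--     if len(text) <= char_limit:
--         return text
--     lines = text.split("\n")
--     # cumulative cost table: cums[i] = sum of len(lines[j]) + 1 for j <= i
--     cums = []
--     running = 0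
--     for line in lines:
--         running += len(line) + 1
--         cums.append(running)
--     # binary search for the number of leading lines whose cumulative cost fits
--     key = char_limit + 1
--     lo, hi = 0, len(cums)
--     while lo < hi:
--         mid = (lo + hi) // 2
--         if cums[mid] <= key:
--             lo = mid + 1
--         else:
--             hi = mid
--     return "\n".join(lines[:lo])
-- ===== Notes on version B (the rewrite author's own statement) =====
-- stated objective: alternative
-- what changed: The short-circuit accumulate-and-break line loop is replaced by building a cumulative-length prefix-sum table and locating the cutoff line count with a binary search (bisect_right on cums for char_limit+1), then joining the first count lines.
import Mathlib
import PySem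

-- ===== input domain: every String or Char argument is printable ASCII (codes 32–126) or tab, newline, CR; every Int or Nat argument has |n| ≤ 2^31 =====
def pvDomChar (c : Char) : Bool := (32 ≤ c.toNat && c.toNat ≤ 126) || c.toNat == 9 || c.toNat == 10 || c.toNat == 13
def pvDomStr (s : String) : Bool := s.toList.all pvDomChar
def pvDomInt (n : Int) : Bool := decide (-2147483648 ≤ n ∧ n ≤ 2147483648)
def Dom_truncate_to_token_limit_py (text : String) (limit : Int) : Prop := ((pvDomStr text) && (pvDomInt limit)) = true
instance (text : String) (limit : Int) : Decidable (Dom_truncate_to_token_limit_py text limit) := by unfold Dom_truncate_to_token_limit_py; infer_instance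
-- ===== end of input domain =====

-- B replaces A's accumulate-and-break line loop by a prefix-sum table plus binary search (alternative decomposition, same cost).

-- ===== PORT A =====
-- the 'for line in lines: if total+len(line)>char_limit: break; append; total += len+1' loop
def truncLoop (char_limit : Int) : List String → Int → List String → List String
  | [], _, acc => acc
  | l :: rest, total, acc =>
    if total + PySem.Str.len l > char_limit then acc
    else truncLoop char_limit rest (total + PySem.Str.len l + 1) (acc ++ [l])

def truncate_to_token_limit_py (text : String) (limit : Int) : String :=
  let char_limit := limit * 2
  if PySem.Str.len text ≤ char_limit then text
  else
    -- text.split("\n"): sep ≠ "" so split? is always some; getD only for totality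
    let lines := (PySem.Str.split? text "\n").getD []
    PySem.Str.join "\n" (truncLoop char_limit lines 0 [])

-- ===== PORT B =====
-- the cumulative-length table loop of Source B
def cumsOf : List String → Int → List Int
  | [], _ => []
  | l :: rest, running =>
    (running + PySem.Str.len l + 1) :: cumsOf rest (running + PySem.Str.len l + 1)

-- the hand-written 'while lo < hi' binary search of Source B
def bsearch (cums : List Int) (key : Int) (lo hi : Nat) : Nat :=
  if lo < hi then
    let mid := (lo + hi) / 2
    if PySem.List.pyGetD cums (mid : Int) 0 ≤ key then bsearch cums key (mid + 1) hi
    else bsearch cums key lo mid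
  else lo
termination_by hi - lo
decreasing_by all_goals omega

def truncate_to_token_limit_py_alt (text : String) (limit : Int) : String :=
  let char_limit := limit * 2
  if PySem.Str.len text ≤ char_limit then text
  else
    let lines := (PySem.Str.split? text "\n").getD []
    let cums := cumsOf lines 0
    let count := bsearch cums (char_limit + 1) 0 cums.length
    PySem.Str.join "\n" (lines.take count)

-- ===== PRECONDITION & SPEC =====
def Spec_truncate_to_token_limit_py (text : String) (limit : Int) (out : String) : Prop := out = truncate_to_token_limit_py_alt text limit
instance (text : String) (limit : Int) (out : String) : Decidable (Spec_truncate_to_token_limit_py text limit out) := by unfold Spec_truncate_to_token_limit_py; infer_instance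

-- ===== CLAIM =====
def Claim_equal_truncate_to_token_limit_py : Prop := ∀ (text : String) (limit : Int), Dom_truncate_to_token_limit_py text limit → Spec_truncate_to_token_limit_py text limit (truncate_to_token_limit_py text limit)

-- ===== LEMMAS AND PROOFS =====

-- number of lines A's loop keeps, in recursive form
def specCount (C : Int) : List String → Int → Nat
  | [], _ => 0
  | l :: rest, total =>
    if total + PySem.Str.len l > C then 0
    else specCount C rest (total + PySem.Str.len l + 1) + 1

-- characterization of a cutoff count for a table cums and key
def CutAt (cums : List Int) (key : Int) (r : Nat) : Prop :=
  r ≤ cums.length ∧ (∀ j (h : j < cums.length), j < r → cums[j] ≤ key) ∧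
    (∀ j (h : j < cums.length), r ≤ j → key < cums[j])

theorem cutAt_unique {cums : List Int} {key : Int} {r s : Nat}
    (hr : CutAt cums key r) (hs : CutAt cums key s) : r = s := by
  obtain ⟨hr1, hr2, hr3⟩ := hr
  obtain ⟨hs1, hs2, hs3⟩ := hs
  rcases Nat.lt_trichotomy r s with h | h | h
  · have hlen : r < cums.length := lt_of_lt_of_le h hs1
    have := hs2 r hlen h
    have := hr3 r hlen (le_refl r)
    omega
  · exact h
  · have hlen : s < cums.length := lt_of_lt_of_le h hr1
    have := hr2 s hlen h
    have := hs3 s hlen (le_refl s)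
    omega

theorem len_nonneg (l : String) : 0 ≤ PySem.Str.len l := by
  simp [PySem.Str.len_eq]

theorem mem_cumsOf_gt {lines : List String} {t x : Int} (hx : x ∈ cumsOf lines t) : t < x := by
  induction lines generalizing t with
  | nil => simp [cumsOf] at hx
  | cons l rest ih =>
    simp only [cumsOf, List.mem_cons] at hx
    have hl := len_nonneg l
    rcases hx with h | h
    · omega
    · have := ih h; omega

theorem sorted_cumsOf (lines : List String) (t : Int) : (cumsOf lines t).Pairwise (· ≤ ·) := by
  induction lines generalizing t with
  | nil => simp [cumsOf]
  | cons l rest ih =>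
    simp only [cumsOf, List.pairwise_cons]
    refine ⟨fun x hx => le_of_lt (mem_cumsOf_gt hx), ih _⟩

theorem specCount_cutAt (C : Int) (lines : List String) (t : Int) :
    CutAt (cumsOf lines t) (C + 1) (specCount C lines t) := by
  induction lines generalizing t with
  | nil =>
    refine ⟨by simp [specCount, cumsOf], ?_, ?_⟩ <;> intro j h <;> simp [cumsOf] at h
  | cons l rest ih =>
    simp only [specCount, cumsOf]
    by_cases hb : t + PySem.Str.len l > C
    · simp only [if_pos hb]
      refine ⟨Nat.zero_le _, ?_, ?_⟩
      · intro j h hj; omega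
      · intro j h _
        match j with
        | 0 => simpa using (by omega : C + 1 < t + PySem.Str.len l + 1)
        | j + 1 =>
          have hj' : j < (cumsOf rest (t + PySem.Str.len l + 1)).length := by simpa using h
          have hmem : (cumsOf rest (t + PySem.Str.len l + 1))[j]'hj' ∈ cumsOf rest (t + PySem.Str.len l + 1) :=
            List.getElem_mem hj'
          have := mem_cumsOf_gt hmem
          simp only [List.getElem_cons_succ]
          omega
    · simp only [if_neg hb]
      obtain ⟨h1, h2, h3⟩ := ih (t + PySem.Str.len l + 1)
      refine ⟨by simpa using Nat.succ_le_succ h1, ?_, ?_⟩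
      · intro j h hj
        match j with
        | 0 => simpa using (by omega : t + PySem.Str.len l + 1 ≤ C + 1)
        | j + 1 =>
          simp only [List.getElem_cons_succ]
          exact h2 j (by simpa using h) (by omega)
      · intro j h hj
        match j with
        | 0 => omega
        | j + 1 =>
          simp only [List.getElem_cons_succ]
          exact h3 j (by simpa using h) (by omega)

theorem bsearch_cutAt (cums : List Int) (key : Int) (hsort : cums.Pairwise (· ≤ ·)) :
    ∀ n lo hi, hi - lo ≤ n → lo ≤ hi → hi ≤ cums.length →
    (∀ j (h : j < cums.length), j < lo → cums[j] ≤ key) →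
    (∀ j (h : j < cums.length), hi ≤ j → key < cums[j]) →
    CutAt cums key (bsearch cums key lo hi) := by
  have hpair : ∀ i j (hi : i < cums.length) (hj : j < cums.length), i ≤ j → cums[i] ≤ cums[j] := by
    intro i j hi hj hij
    rcases Nat.lt_or_ge i j with h | h
    · exact (List.pairwise_iff_getElem.mp hsort) i j hi hj h
    · have : i = j := by omega
      subst this; exact le_refl _
  intro n
  induction n with
  | zero =>
    intro lo hi hn hlh hhl h2 h3
    have : lo = hi := by omega
    subst this
    rw [bsearch]
    simp only [lt_irrefl, if_false]
    exact ⟨hhl, h2, fun j h hj => h3 j h hj⟩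
  | succ n ih =>
    intro lo hi hn hlh hhl h2 h3
    rw [bsearch]
    by_cases hlt : lo < hi
    · simp only [if_pos hlt]
      have hmidlt : (lo + hi) / 2 < cums.length := by omega
      have hget : PySem.List.pyGetD cums (((lo + hi) / 2 : Nat) : Int) 0 = cums[(lo + hi) / 2]'hmidlt := by
        rw [PySem.List.pyGetD_natCast]
        exact List.getD_eq_getElem cums 0 hmidlt
      by_cases hc : cums[(lo + hi) / 2] ≤ key
      · rw [if_pos (by rw [hget]; exact hc)]
        exact ih ((lo + hi) / 2 + 1) hi (by omega) (by omega) hhl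
          (fun j h hj => le_trans (hpair j ((lo + hi) / 2) h hmidlt (by omega)) hc) h3
      · rw [if_neg (by rw [hget]; exact hc)]
        exact ih lo ((lo + hi) / 2) (by omega) (by omega) (by omega) h2
          (fun j h hj => lt_of_lt_of_le (by omega) (hpair ((lo + hi) / 2) j hmidlt h hj))
    · simp only [if_neg hlt]
      have : lo = hi := by omega
      subst this
      exact ⟨hhl, h2, fun j h hj => h3 j h hj⟩

theorem truncLoop_eq_take (C : Int) (lines : List String) :
    ∀ t acc, truncLoop C lines t acc = acc ++ lines.take (specCount C lines t) := by
  induction lines with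
  | nil => intro t acc; simp [truncLoop, specCount]
  | cons l rest ih =>
    intro t acc
    by_cases hb : C < t + (l.length : Int)
    · simp [truncLoop, specCount, hb]
    · simp only [truncLoop, specCount, PySem.Str.len_eq, String.length_toList, if_neg hb, ih,
        List.take_succ_cons, List.append_assoc, List.singleton_append]

-- ===== VERDICT =====
theorem truncate_to_token_limit_py_spec : Claim_equal_truncate_to_token_limit_py := by
  intro text limit _
  unfold Spec_truncate_to_token_limit_py truncate_to_token_limit_py truncate_to_token_limit_py_alt
  by_cases hg : (text.length : Int) ≤ limit * 2
  · simp [hg]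
  · simp only [PySem.Str.len_eq, String.length_toList, if_neg hg]
    set lines := (PySem.Str.split? text "\n").getD [] with hlines
    congr 1
    rw [truncLoop_eq_take, List.nil_append]
    have hc : specCount (limit * 2) lines 0 =
        bsearch (cumsOf lines 0) (limit * 2 + 1) 0 (cumsOf lines 0).length := by
      refine cutAt_unique (specCount_cutAt (limit * 2) lines 0) ?_
      exact bsearch_cutAt (cumsOf lines 0) (limit * 2 + 1) (sorted_cumsOf lines 0)
        (cumsOf lines 0).length 0 (cumsOf lines 0).length (le_refl _) (Nat.zero_le _) (le_refl _)
        (fun j h hj => by omega) (fun j h hj => by omega)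
    rw [hc]
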